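-- pv_equiv track=rewrite | github.com/MauriceLee/financial_research | financial_research.py | three_days
-- ===== SOURCE A (Python) =====
-- def three_days(data):
--     last = data[0]
--     big = 0
--     small = 0
--     result = []
--     for d in data:
--         if d > last:
--             small = 0
--             big += 1
--             if big >= 3:
--                 result.append(1)
--             else:
--                 result.append(0)
--         elif d < last:
--             big = 0
--             small -= 1
--             if small <= -3:
--                 result.append(-1)
--             else:
--                 result.append(0)
--         else:
--             big = 0
--             small = 0
--             result.append(0)
--         last = d
--
--     return result
-- ===== SOURCE B (Python) =====
-- def three_days(data):
--     n = len(data)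
--     head = [0] * min(n, 3)
--     rest = [
--         1 if a < b < c < d else -1 if a > b > c > d else 0
--         for a, b, c, d in zip(data, data[1:], data[2:], data[3:])
--     ]
--     return head + rest
-- ===== Notes on version B (the rewrite author's own statement) =====
-- stated objective: alternative
-- what changed: Replaces the stateful running-counter scan with a stateless sliding-window formulation: zip the list with its three shifted copies and flag each 4-window that is strictly monotone, prefixing zeros for the first three positions.
import Mathlib
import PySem

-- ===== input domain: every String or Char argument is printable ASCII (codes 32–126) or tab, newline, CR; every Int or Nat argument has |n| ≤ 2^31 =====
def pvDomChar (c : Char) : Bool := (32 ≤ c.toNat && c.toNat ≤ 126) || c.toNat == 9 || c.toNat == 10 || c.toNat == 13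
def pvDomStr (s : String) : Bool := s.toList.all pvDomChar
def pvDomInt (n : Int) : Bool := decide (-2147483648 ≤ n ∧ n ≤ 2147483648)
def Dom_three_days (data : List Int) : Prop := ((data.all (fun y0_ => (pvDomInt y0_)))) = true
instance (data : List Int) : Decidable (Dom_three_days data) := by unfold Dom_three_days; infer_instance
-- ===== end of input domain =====

-- B replaces A's stateful running-counter scan by a stateless sliding-window scan (zip with three shifted copies); same O(n) cost, different decomposition.

-- ===== PORT A =====
-- Literal port of A: a single fold over data carrying (last, big, small, result).
-- stepA is the loop body of A, named so the proofs can refer to it.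
def stepA (s : Int × Int × Int × List Int) (d : Int) : Int × Int × Int × List Int :=
  let last := s.1; let big := s.2.1; let small := s.2.2.1; let result := s.2.2.2
  if d > last then
    let big := big + 1
    (d, big, 0, result ++ [if big ≥ 3 then 1 else 0])
  else if d < last then
    let small := small - 1
    (d, 0, small, result ++ [if small ≤ -3 then -1 else 0])
  else
    (d, 0, 0, result ++ [0])

def three_days (data : List Int) : List Int :=
  match PySem.List.pyGet? data 0 with
  | none => []  -- data[0] raises IndexError; excluded by Pre_three_days
  | some last0 => (data.foldl stepA (last0, 0, 0, [])).2.2.2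

-- ===== PORT B =====
def winFlag (a b c d : Int) : Int :=
  if a < b ∧ b < c ∧ c < d then 1 else if a > b ∧ b > c ∧ c > d then -1 else 0

-- Port of B: zeros for the first min(n,3) positions, then a flag per 4-window
-- obtained by zipping data with its three shifted copies.
def three_days_alt (data : List Int) : List Int :=
  let n := data.length
  let head := List.replicate (min n 3) (0 : Int)
  let rest := (((data.zip (data.drop 1)).zip (data.drop 2)).zip (data.drop 3)).map
    (fun x => winFlag x.1.1.1 x.1.1.2 x.1.2 x.2)
  head ++ rest

-- ===== PRECONDITION & SPEC =====
-- Pre_ excludes exactly the empty list, on which A raises IndexError (data[0]).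
def Pre_three_days (data : List Int) : Prop := data ≠ []
instance (data : List Int) : Decidable (Pre_three_days data) := by
  unfold Pre_three_days; infer_instance
def pvWitness_three_days : List Int := [1, 2, 3, 4, 2]

def Spec_three_days (data : List Int) (out : List Int) : Prop := out = three_days_alt data
instance (data : List Int) (out : List Int) : Decidable (Spec_three_days data out) := by unfold Spec_three_days; infer_instance

-- ===== CLAIM (what is proved, stated in full; the proofs are below) =====
def Claim_equal_three_days : Prop := ∀ (data : List Int), Dom_three_days data → Pre_three_days data → Spec_three_days data (three_days data)

-- ===== LEMMAS AND PROOFS =====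

-- sign of the step from x to y
def sgn (x y : Int) : Int := if y > x then 1 else if y < x then -1 else 0

theorem sgn_one_iff (x y : Int) : sgn x y = 1 ↔ x < y := by
  unfold sgn
  by_cases h1 : y > x
  · rw [if_pos h1]
    exact ⟨fun _ => h1, fun _ => rfl⟩
  · rw [if_neg h1]
    by_cases h2 : y < x
    · rw [if_pos h2]
      exact ⟨fun hh => absurd hh (by norm_num), fun hh => absurd hh h1⟩
    · rw [if_neg h2]
      exact ⟨fun hh => absurd hh (by norm_num), fun hh => absurd hh h1⟩

theorem sgn_negone_iff (x y : Int) : sgn x y = -1 ↔ y < x := by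
  unfold sgn
  by_cases h1 : y > x
  · rw [if_pos h1]
    exact ⟨fun hh => absurd hh (by norm_num), fun hh => absurd h1 (by omega)⟩
  · rw [if_neg h1]
    by_cases h2 : y < x
    · rw [if_pos h2]
      exact ⟨fun _ => h2, fun _ => rfl⟩
    · rw [if_neg h2]
      exact ⟨fun hh => absurd hh (by norm_num), fun hh => absurd hh h2⟩

-- A's loop, in emitting form
def loopA (last big small : Int) : List Int → List Int
  | [] => []
  | d :: t =>
    if d > last then (if big + 1 ≥ 3 then (1:Int) else 0) :: loopA d (big + 1) 0 t
    else if d < last then (if small - 1 ≤ -3 then (-1:Int) else 0) :: loopA d 0 (small - 1) t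
    else 0 :: loopA d 0 0 t

-- stateless reformulation: carries the previous two step signs
def F (last p2 p1 : Int) : List Int → List Int
  | [] => []
  | d :: t =>
    (if d > last then (if p2 = 1 ∧ p1 = 1 then (1:Int) else 0)
     else if d < last then (if p2 = -1 ∧ p1 = -1 then (-1:Int) else 0)
     else 0) :: F d p1 (sgn last d) t

-- the window flags of B as a direct recursion
def wins : List Int → List Int
  | a :: b :: c :: d :: t => winFlag a b c d :: wins (b :: c :: d :: t)
  | _ => []

theorem foldlA (s : List Int) : ∀ (last big small : Int) (acc : List Int),
    (s.foldl stepA (last, big, small, acc)).2.2.2 = acc ++ loopA last big small s := by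
  induction s with
  | nil => intro last big small acc; simp [loopA]
  | cons d t ih =>
    intro last big small acc
    rw [List.foldl_cons]
    simp only [stepA, loopA]
    split_ifs <;> simp [ih]

theorem loopA_eq_F (s : List Int) : ∀ (last big small p2 p1 : Int),
    0 ≤ big → small ≤ 0 →
    (1 ≤ big ↔ p1 = 1) → (2 ≤ big ↔ (p2 = 1 ∧ p1 = 1)) →
    (small ≤ -1 ↔ p1 = -1) → (small ≤ -2 ↔ (p2 = -1 ∧ p1 = -1)) →
    loopA last big small s = F last p2 p1 s := by
  induction s with
  | nil => intros; rfl
  | cons d t ih =>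
    intro last big small p2 p1 h0 h5 h1 h2 h3 h4
    simp only [loopA, F]
    by_cases hgt : d > last
    · rw [if_pos hgt, if_pos hgt]
      have hs : sgn last d = 1 := by rw [sgn_one_iff]; omega
      refine congrArg₂ (· :: ·) ?_ ?_
      · split_ifs <;> omega
      · rw [hs]
        exact ih d (big + 1) 0 p1 1 (by omega) (by omega)
          (by constructor <;> intro hh <;> omega)
          (by constructor <;> intro hh <;> omega)
          (by constructor <;> intro hh <;> omega)
          (by constructor <;> intro hh <;> omega)
    · rw [if_neg hgt, if_neg hgt]
      by_cases hlt : d < last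
      · rw [if_pos hlt, if_pos hlt]
        have hs : sgn last d = -1 := by rw [sgn_negone_iff]; omega
        refine congrArg₂ (· :: ·) ?_ ?_
        · split_ifs <;> omega
        · rw [hs]
          exact ih d 0 (small - 1) p1 (-1) (by omega) (by omega)
            (by constructor <;> intro hh <;> omega)
            (by constructor <;> intro hh <;> omega)
            (by constructor <;> intro hh <;> omega)
            (by constructor <;> intro hh <;> omega)
      · rw [if_neg hlt, if_neg hlt]
        have hs : sgn last d = 0 := by unfold sgn; split_ifs <;> omega
        rw [hs]
        refine congrArg₂ (· :: ·) rfl ?_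
        exact ih d 0 0 p1 0 (by omega) (by omega)
          (by constructor <;> intro hh <;> omega)
          (by constructor <;> intro hh <;> omega)
          (by constructor <;> intro hh <;> omega)
          (by constructor <;> intro hh <;> omega)

theorem F_eq_wins (t : List Int) : ∀ (a b c : Int),
    F c (sgn a b) (sgn b c) t = wins (a :: b :: c :: t) := by
  induction t with
  | nil => intros; rfl
  | cons d t' ih =>
    intro a b c
    simp only [F, wins]
    refine congrArg₂ (· :: ·) ?_ (ih b c d)
    simp only [winFlag, sgn_one_iff, sgn_negone_iff]
    split_ifs <;> omega

theorem zip_eq_wins (n : Nat) : ∀ (data : List Int), data.length ≤ n →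
    (((data.zip (data.drop 1)).zip (data.drop 2)).zip (data.drop 3)).map
      (fun x => winFlag x.1.1.1 x.1.1.2 x.1.2 x.2) = wins data := by
  induction n with
  | zero =>
    intro data h
    have : data = [] := List.eq_nil_of_length_eq_zero (Nat.le_zero.mp h)
    subst this; rfl
  | succ n ih =>
    intro data h
    match data with
    | [] => rfl
    | [a] => rfl
    | [a, b] => rfl
    | [a, b, c] => rfl
    | a :: b :: c :: d :: t =>
      simp only [wins]
      rw [show List.drop 1 (a::b::c::d::t) = b::c::d::t from rfl,
          show List.drop 2 (a::b::c::d::t) = c::d::t from rfl,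
          show List.drop 3 (a::b::c::d::t) = d::t from rfl]
      simp only [List.zip_cons_cons, List.map_cons]
      refine congrArg₂ (· :: ·) rfl ?_
      have := ih (b :: c :: d :: t) (by simp at h ⊢; omega)
      rw [show List.drop 1 (b::c::d::t) = c::d::t from rfl,
          show List.drop 2 (b::c::d::t) = d::t from rfl,
          show List.drop 3 (b::c::d::t) = t from rfl] at this
      exact this

theorem alt_eq (t : List Int) (x : Int) :
    three_days_alt (x :: t) = 0 :: F x 0 0 t := by
  simp only [three_days_alt]
  rw [zip_eq_wins (x :: t).length (x :: t) le_rfl]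
  match t with
  | [] => rfl
  | [y] => simp [F, wins]
  | y :: z :: t3 =>
    show List.replicate (min (x :: y :: z :: t3).length 3) (0:Int) ++ wins (x :: y :: z :: t3)
        = 0 :: F x 0 0 (y :: z :: t3)
    rw [show min (x :: y :: z :: t3).length 3 = 3 by simp,
        ← F_eq_wins t3 x y z]
    simp only [F, List.replicate, List.cons_append, List.nil_append]
    refine congrArg₂ (· :: ·) rfl (congrArg₂ (· :: ·) ?_ (congrArg₂ (· :: ·) ?_ rfl))
    · norm_num
    · norm_num

-- ===== VERDICT (by name: the statement is the Claim_ definition above) =====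
theorem three_days_spec : Claim_equal_three_days := by
  intro data _ hpre
  unfold Spec_three_days
  match data, hpre with
  | x :: t, _ =>
    unfold three_days
    rw [PySem.List.pyGet?_zero_cons]
    show (List.foldl stepA (x, 0, 0, []) (x :: t)).2.2.2 = three_days_alt (x :: t)
    rw [foldlA, alt_eq, List.nil_append]
    rw [show loopA x 0 0 (x :: t) = 0 :: loopA x 0 0 t by
      simp only [loopA]; rw [if_neg (lt_irrefl x), if_neg (lt_irrefl x)]]
    exact congrArg₂ (· :: ·) rfl
      (loopA_eq_F t x 0 0 0 0 (by omega) (by omega)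
        (by constructor <;> intro hh <;> omega)
        (by constructor <;> intro hh <;> omega)
        (by constructor <;> intro hh <;> omega)
        (by constructor <;> intro hh <;> omega))
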